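-- pv_equiv track=rewrite | github.com/magical/cs478 | lamport.py | bitsof
-- ===== SOURCE A (Python) =====
-- def bitsof(m):
--     for x in m:
--         yield x & 1
--         yield (x>>1) & 1
--         yield (x>>2) & 1
--         yield (x>>3) & 1
--         yield (x>>4) & 1
--         yield (x>>5) & 1
--         yield (x>>6) & 1
--         yield (x>>7) & 1
-- ===== SOURCE B (Python) =====
-- # Staged bit-plane passes: compute each bit position across the whole message
-- # in its own pass, then interleave the eight planes by transposition (zip).
-- def bitsof(m):
--     b0 = [x & 1 for x in m]
--     b1 = [(x >> 1) & 1 for x in m]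
--     b2 = [(x >> 2) & 1 for x in m]
--     b3 = [(x >> 3) & 1 for x in m]
--     b4 = [(x >> 4) & 1 for x in m]
--     b5 = [(x >> 5) & 1 for x in m]
--     b6 = [(x >> 6) & 1 for x in m]
--     b7 = [(x >> 7) & 1 for x in m]
--     for bits in zip(b0, b1, b2, b3, b4, b5, b6, b7):
--         yield from bits
-- ===== Notes on version B (the rewrite author's own statement) =====
-- stated objective: alternative
-- what changed: B inverts the traversal: instead of one pass emitting 8 bits per element, it makes eight staged passes each extracting one bit-plane of the whole message, then interleaves the planes by transposition (zip), yielding the same LSB-first sequence.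
import Mathlib
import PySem

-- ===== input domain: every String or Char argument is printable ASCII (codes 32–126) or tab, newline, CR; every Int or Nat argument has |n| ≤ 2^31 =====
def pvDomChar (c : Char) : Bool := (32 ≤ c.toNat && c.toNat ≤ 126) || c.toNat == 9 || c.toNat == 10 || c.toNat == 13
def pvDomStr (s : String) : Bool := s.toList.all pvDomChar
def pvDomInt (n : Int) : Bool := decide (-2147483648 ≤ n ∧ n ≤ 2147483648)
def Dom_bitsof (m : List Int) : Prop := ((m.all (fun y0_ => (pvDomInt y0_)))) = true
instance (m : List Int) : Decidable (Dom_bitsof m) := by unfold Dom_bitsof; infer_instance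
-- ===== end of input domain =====

-- B replaces A's single pass (8 bits per element) by eight staged bit-plane passes over
-- the whole message followed by an interleaving transposition (zip): an alternative
-- decomposition, same asymptotic cost. Both are generators in Python; equivalence is
-- about the yielded sequence (as a list).

-- ===== PORT A =====
def bitsof (m : List Int) : List Int :=
  m.flatMap (fun x =>
    [PySem.Int.band x 1,
     PySem.Int.band (x >>> (1:Nat)) 1,
     PySem.Int.band (x >>> (2:Nat)) 1,
     PySem.Int.band (x >>> (3:Nat)) 1,
     PySem.Int.band (x >>> (4:Nat)) 1,
     PySem.Int.band (x >>> (5:Nat)) 1,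
     PySem.Int.band (x >>> (6:Nat)) 1,
     PySem.Int.band (x >>> (7:Nat)) 1])

-- ===== PORT B =====
-- zip(b0, …, b7): truncates at the shortest list, exactly Python's zip of 8 sequences
def pvZip8 : List Int → List Int → List Int → List Int → List Int → List Int → List Int → List Int → List (List Int)
  | a::as, b::bs, c::cs, d::ds, e::es, f::fs, g::gs, h::hs =>
      [a, b, c, d, e, f, g, h] :: pvZip8 as bs cs ds es fs gs hs
  | _, _, _, _, _, _, _, _ => []

def bitsof_alt (m : List Int) : List Int :=
  let b0 := m.map (fun (x : Int) => PySem.Int.band x 1)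
  let b1 := m.map (fun (x : Int) => PySem.Int.band (x >>> (1:Nat)) 1)
  let b2 := m.map (fun (x : Int) => PySem.Int.band (x >>> (2:Nat)) 1)
  let b3 := m.map (fun (x : Int) => PySem.Int.band (x >>> (3:Nat)) 1)
  let b4 := m.map (fun (x : Int) => PySem.Int.band (x >>> (4:Nat)) 1)
  let b5 := m.map (fun (x : Int) => PySem.Int.band (x >>> (5:Nat)) 1)
  let b6 := m.map (fun (x : Int) => PySem.Int.band (x >>> (6:Nat)) 1)
  let b7 := m.map (fun (x : Int) => PySem.Int.band (x >>> (7:Nat)) 1)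
  (pvZip8 b0 b1 b2 b3 b4 b5 b6 b7).flatMap (fun bits => bits)

-- ===== PRECONDITION & SPEC =====
def Spec_bitsof (m : List Int) (out : List Int) : Prop := out = bitsof_alt m
instance (m : List Int) (out : List Int) : Decidable (Spec_bitsof m out) := by unfold Spec_bitsof; infer_instance

-- ===== CLAIM (what is proved, stated in full; the proofs are below) =====
def Claim_equal_bitsof : Prop := ∀ (m : List Int), Dom_bitsof m → Spec_bitsof m (bitsof m)

-- ===== LEMMAS AND PROOFS =====

-- ===== VERDICT (by name: the statement is the Claim_ definition above) =====
theorem bitsof_spec : Claim_equal_bitsof := by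
  intro m hd
  clear hd
  show bitsof m = bitsof_alt m
  induction m with
  | nil => rfl
  | cons x xs ih =>
      simp only [bitsof, bitsof_alt, List.flatMap_cons, List.map_cons, pvZip8]
      simp only [bitsof, bitsof_alt] at ih
      rw [ih]
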